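-- pv_equiv track=rewrite | github.com/ivanstambuk/deep-research | .githooks/validate-empty-table-rows.py | is_all_empty_table_row
-- ===== SOURCE A (Python) =====
-- def is_all_empty_table_row(line: str) -> bool:
--     stripped = line.strip()
--     if not stripped.startswith("|") or not stripped.endswith("|"):
--         return False
--
--     cells = stripped.split("|")[1:-1]
--     if not cells:
--         return False
--
--     return all(cell.strip() == "" for cell in cells)
-- ===== SOURCE B (Python) =====
-- def is_all_empty_table_row(line: str) -> bool:
--     s = line.strip()
--     if not (s.startswith("|") and s.endswith("|")):
--         return False
--     if s.count("|") < 2: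
--         return False
--     return all(c == "|" or c.isspace() for c in s)
-- ===== Notes on version B (the rewrite author's own statement) =====
-- stated objective: simpler
-- what changed: Replaces splitting the stripped line into a cell list plus per-cell strip checks with a pipe count and a single character-level scan, eliminating the intermediate cell list.
import Mathlib
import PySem

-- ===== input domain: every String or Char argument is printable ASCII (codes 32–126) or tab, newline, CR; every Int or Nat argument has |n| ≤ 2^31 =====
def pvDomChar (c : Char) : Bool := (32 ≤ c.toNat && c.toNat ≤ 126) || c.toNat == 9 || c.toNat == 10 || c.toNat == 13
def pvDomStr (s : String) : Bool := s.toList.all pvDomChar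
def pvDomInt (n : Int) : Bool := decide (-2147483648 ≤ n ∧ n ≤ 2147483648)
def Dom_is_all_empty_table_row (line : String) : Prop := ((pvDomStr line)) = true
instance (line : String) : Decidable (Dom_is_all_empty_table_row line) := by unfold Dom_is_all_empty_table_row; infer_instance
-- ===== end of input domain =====

-- B replaces A's split-into-cells pass and per-cell strips by a pipe count plus one
-- character-level scan of the stripped line (simpler; no intermediate cell list).

-- ===== PORT A =====
def is_all_empty_table_row (line : String) : Bool :=
  let stripped := PySem.Chars.strip line.toList
  if !(PySem.Chars.startswith stripped ['|']) || !(PySem.Chars.endswith stripped ['|']) then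
    false
  else
    let cells := PySem.List.slice (PySem.Chars.splitOn stripped ['|']) (some 1) (some (-1))
    if cells.isEmpty then false
    else cells.all (fun cell => PySem.Chars.strip cell == [])

-- ===== PORT B =====
def is_all_empty_table_row_alt (line : String) : Bool :=
  let s := PySem.Chars.strip line.toList
  if !(PySem.Chars.startswith s ['|'] && PySem.Chars.endswith s ['|']) then
    false
  else if PySem.Chars.count s ['|'] < 2 then
    false
  else
    s.all (fun c => c == '|' || PySem.Chars.isspace c)

-- ===== PRECONDITION & SPEC =====
def Spec_is_all_empty_table_row (line : String) (out : Bool) : Prop := out = is_all_empty_table_row_alt line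
instance (line : String) (out : Bool) : Decidable (Spec_is_all_empty_table_row line out) := by unfold Spec_is_all_empty_table_row; infer_instance

-- ===== CLAIM (what is proved, stated in full; the proofs are below) =====
def Claim_equal_is_all_empty_table_row : Prop := ∀ (line : String), Dom_is_all_empty_table_row line → Spec_is_all_empty_table_row line (is_all_empty_table_row line)

-- ===== LEMMAS AND PROOFS =====

-- proof-only model of splitting on a single '|' (A's splitOn call, fuel removed)
def split1 : List Char → List Char → List (List Char)
  | [], cur => [cur.reverse]
  | c :: rest, cur => if c = '|' then cur.reverse :: split1 rest [] else split1 rest (c :: cur)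

theorem splitOn_go_eq (fuel : Nat) :
    ∀ (l cur : List Char) (acc : List (List Char)) (_ : l.length ≤ fuel),
    PySem.Chars.splitOn.go ['|'] fuel l cur acc = acc.reverse ++ split1 l cur := by
  induction fuel with
  | zero =>
    intro l cur acc h
    have hl : l = [] := List.eq_nil_of_length_eq_zero (Nat.le_zero.mp h)
    subst hl
    simp [PySem.Chars.splitOn.go, split1]
  | succ n ih =>
    intro l cur acc h
    cases l with
    | nil => simp [PySem.Chars.splitOn.go, split1]
    | cons c rest =>
      by_cases hc : c = '|'
      · subst hc
        have hstep : PySem.Chars.splitOn.go ['|'] (n+1) ('|' :: rest) cur acc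
            = PySem.Chars.splitOn.go ['|'] n rest [] (cur.reverse :: acc) := by
          simp [PySem.Chars.splitOn.go, List.isPrefixOf]
        rw [hstep, ih rest [] (cur.reverse :: acc) (by simpa using Nat.succ_le_succ_iff.mp h)]
        simp [split1]
      · have hstep : PySem.Chars.splitOn.go ['|'] (n+1) (c :: rest) cur acc
            = PySem.Chars.splitOn.go ['|'] n rest (c :: cur) acc := by
          simp only [PySem.Chars.splitOn.go, List.isPrefixOf, Bool.and_true]
          rw [if_neg (by simpa [beq_iff_eq] using fun h => hc h.symm)]
        rw [hstep, ih rest (c :: cur) acc (by simpa using Nat.succ_le_succ_iff.mp h)]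
        simp [split1, hc]

theorem splitOn_pipe (s : List Char) : PySem.Chars.splitOn s ['|'] = split1 s [] := by
  simpa using splitOn_go_eq (s.length + 1) s [] [] (by omega)

theorem count_go_eq (fuel : Nat) : ∀ (l : List Char) (acc : Nat) (_ : l.length ≤ fuel),
    PySem.Chars.count.go ['|'] fuel l acc = acc + l.count '|' := by
  induction fuel with
  | zero =>
    intro l acc h
    have hl : l = [] := List.eq_nil_of_length_eq_zero (Nat.le_zero.mp h)
    subst hl
    simp [PySem.Chars.count.go]
  | succ n ih =>
    intro l acc h
    cases l with
    | nil => simp [PySem.Chars.count.go]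
    | cons c rest =>
      by_cases hc : c = '|'
      · subst hc
        have hstep : PySem.Chars.count.go ['|'] (n+1) ('|' :: rest) acc
            = PySem.Chars.count.go ['|'] n rest (acc + 1) := by
          simp [PySem.Chars.count.go, List.isPrefixOf]
        rw [hstep, ih rest (acc + 1) (by simpa using Nat.succ_le_succ_iff.mp h)]
        rw [List.count_cons]
        simp
        omega
      · have hstep : PySem.Chars.count.go ['|'] (n+1) (c :: rest) acc
            = PySem.Chars.count.go ['|'] n rest acc := by
          simp only [PySem.Chars.count.go, List.isPrefixOf, Bool.and_true]
          rw [if_neg (by simpa [beq_iff_eq] using fun h => hc h.symm)]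
        rw [hstep, ih rest acc (by simpa using Nat.succ_le_succ_iff.mp h)]
        rw [List.count_cons]
        simp [hc]

theorem count_pipe (s : List Char) : PySem.Chars.count s ['|'] = s.count '|' := by
  have h : (['|'] : List Char).isEmpty = false := rfl
  simpa [PySem.Chars.count, h] using count_go_eq s.length s 0 (le_refl _)

theorem slice_mid {α : Type} (x y : α) (q : List α) :
    PySem.List.slice (x :: (q ++ [y])) (some 1) (some (-1)) = q := by
  simp only [PySem.List.slice, PySem.List.clampIdx]
  norm_num
  rw [if_neg (by omega : ¬ ((q.length : Int) + 1 < 0))]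
  simpa using List.take_left' (l₂ := [y]) (rfl : (q.length + 1 - 1 : Nat) = q.length).symm

theorem rstrip_eq_nil (q : List Char) :
    PySem.Chars.rstrip q = [] ↔ ∀ c ∈ q, PySem.Chars.isspace c = true := by
  simp [PySem.Chars.rstrip, List.dropWhile_eq_nil_iff]

theorem strip_eq_nil (p : List Char) :
    PySem.Chars.strip p = [] ↔ ∀ c ∈ p, PySem.Chars.isspace c = true := by
  unfold PySem.Chars.strip PySem.Chars.lstrip
  rw [rstrip_eq_nil]
  constructor
  · intro h c hc
    rcases List.mem_append.mp
        ((List.takeWhile_append_dropWhile (p := PySem.Chars.isspace) (l := p)) ▸ hc) with h1 | h2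
    · exact List.mem_takeWhile_imp h1
    · exact h c h2
  · intro h c hc
    exact h c ((List.takeWhile_append_dropWhile (p := PySem.Chars.isspace) (l := p)) ▸
      List.mem_append_right _ hc)

theorem split1_ne_nil (l cur : List Char) : split1 l cur ≠ [] := by
  induction l generalizing cur with
  | nil => simp [split1]
  | cons c rest ih =>
    by_cases hc : c = '|' <;> simp [split1, hc, ih]

theorem split1_isEmpty (l cur : List Char) : (split1 l cur).isEmpty = false := by
  cases hsz : split1 l cur with
  | nil => exact absurd hsz (split1_ne_nil l cur)
  | cons a t => rfl

theorem split1_ws (l : List Char) : ∀ (cur : List Char),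
    ((∀ p ∈ split1 l cur, ∀ c ∈ p, PySem.Chars.isspace c = true) ↔
      ((∀ c ∈ cur, PySem.Chars.isspace c = true) ∧
        ∀ c ∈ l, c = '|' ∨ PySem.Chars.isspace c = true)) := by
  induction l with
  | nil => intro cur; simp [split1]
  | cons c rest ih =>
    intro cur
    by_cases hc : c = '|'
    · subst hc
      simp [split1, ih]
    · rw [show split1 (c :: rest) cur = split1 rest (c :: cur) from by simp [split1, hc]]
      rw [ih (c :: cur)]
      simp only [List.mem_cons]
      constructor
      · rintro ⟨h1, h3⟩
        refine ⟨fun x hx => h1 x (Or.inr hx), fun x hx => ?_⟩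
        rcases hx with rfl | hx
        · exact Or.inr (h1 x (Or.inl rfl))
        · exact h3 x hx
      · rintro ⟨h1, h2⟩
        refine ⟨fun x hx => ?_, fun x hx => h2 x (Or.inr hx)⟩
        rcases hx with rfl | hx
        · rcases h2 x (Or.inl rfl) with h | h
          · exact absurd h hc
          · exact h
        · exact h1 x hx

theorem split1_append_pipe (l : List Char) : ∀ (cur : List Char),
    split1 (l ++ ['|']) cur = split1 l cur ++ [[]] := by
  induction l with
  | nil => intro cur; simp [split1]
  | cons c rest ih =>
    intro cur
    by_cases hc : c = '|' <;> simp [split1, hc, ih]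

-- ===== VERDICT (by name: the statement is the Claim_ definition above) =====
set_option maxHeartbeats 1000000 in
theorem is_all_empty_table_row_spec : Claim_equal_is_all_empty_table_row := by
  intro line _
  unfold Spec_is_all_empty_table_row
  simp only [is_all_empty_table_row, is_all_empty_table_row_alt]
  set cs := PySem.Chars.strip line.toList with hcs
  cases hs : PySem.Chars.startswith cs ['|'] with
  | false => simp
  | true =>
    cases he : PySem.Chars.endswith cs ['|'] with
    | false => simp
    | true =>
      simp only [Bool.and_self, Bool.not_true, Bool.or_self, if_false,
        Bool.false_eq_true]
      have hpre : ['|'] <+: cs :=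
        List.isPrefixOf_iff_prefix.mp (by simpa [PySem.Chars.startswith] using hs)
      have hsuf : ['|'] <:+ cs :=
        List.isSuffixOf_iff_suffix.mp (by simpa [PySem.Chars.endswith] using he)
      obtain ⟨u, hu⟩ := hpre
      obtain ⟨v, hv⟩ := hsuf
      cases v with
      | nil =>
        have h1 : cs = ['|'] := by simpa using hv.symm
        rw [h1, splitOn_pipe, count_pipe]
        rw [show split1 ['|'] [] = [] :: (([] : List (List Char)) ++ [[]]) from by simp [split1]]
        rw [slice_mid]
        simp
      | cons d w =>
        obtain ⟨hd, hu2⟩ : d = '|' ∧ u = w ++ ['|'] := by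
          have h0 := hu.trans hv.symm
          simp only [List.cons_append, List.nil_append, List.cons.injEq] at h0
          exact ⟨h0.1.symm, h0.2⟩
        subst hd
        have hcs2 : cs = '|' :: (w ++ ['|']) := by rw [← hu, hu2]; rfl
        rw [hcs2, splitOn_pipe, count_pipe]
        rw [show split1 ('|' :: (w ++ ['|'])) [] = [] :: (split1 w [] ++ [[]]) from by
          simp [split1, split1_append_pipe]]
        rw [slice_mid]
        have hcount : ¬ (('|' :: (w ++ ['|'])).count '|' < 2) := by
          simp [List.count_append]
        rw [split1_isEmpty, if_neg hcount]
        simp only [Bool.false_eq_true, if_false]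
        rw [Bool.eq_iff_iff]
        simp only [List.all_eq_true, beq_iff_eq, strip_eq_nil, Bool.or_eq_true,
          List.mem_cons, List.mem_append]
        rw [split1_ws w []]
        constructor
        · rintro ⟨-, h⟩ c hcmem
          rcases hcmem with rfl | hw | rfl | hnil
          · exact Or.inl rfl
          · exact h c hw
          · exact Or.inl rfl
          · simp at hnil
        · intro h
          refine ⟨by simp, fun c hc => h c (Or.inr (Or.inl hc))⟩
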